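-- pv_equiv track=rewrite | github.com/Danielle-Huber/CPSC322FinalProject | mysklearn/myutils.py | calc_majority_leaf
-- ===== SOURCE A (Python) =====
-- def get_frequencies(col):
--     """ gets frequencies for the passed in col_name and returns parallel arrays
--     with the values in the collumns and the counts
--     Args:
--         col: (list) column name of frequencies to find
--     Returns:
--         values: (list) values in col_name
--         counts: (list) paralel list to values list of frequency counts
--     """
--
--     col.sort() # inplace
--     values = []
--     counts = []
--
--     for value in col:
--         if value not in values:
--             # first time we have seen this value
--             values.append(value)
--             counts.append(1)
--         else:
--             # we have seen this value before
--             counts[-1] += 1 # ok because the list is sorted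
--
--     return values, counts
--
-- def calc_majority_leaf(partition):
--     """ calculates the majority class leaf node of the partition and returns the classification
--     Args:
--         partition: (list of lists) partitions of data
--     Returns:
--         classification: (String) majority vote classification of partitions
--     """
--     col = []
--     classification = ""
--     for item in partition:
--         col.append(item[-1])
--
--     values, counts = get_frequencies(col)
--     max_num = max(counts)
--     max_index = counts.index(max_num)
--     classification = values[max_index]
--
--     return classification
-- ===== SOURCE B (Python) =====
-- def calc_majority_leaf(partition):
--     labels = sorted(item[-1] for item in partition)
--     return max(dict.fromkeys(labels), key=labels.count)
-- ===== Notes on version B (the rewrite author's own statement) =====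
-- stated objective: idiomatic
-- what changed: Replaces the hand-rolled parallel values/counts arrays with run-length bumping plus max/index recovery by a two-liner: sort the labels, dedup with dict.fromkeys, and take max(..., key=labels.count), which directly yields the first (smallest) label of maximal frequency.
import Mathlib
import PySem

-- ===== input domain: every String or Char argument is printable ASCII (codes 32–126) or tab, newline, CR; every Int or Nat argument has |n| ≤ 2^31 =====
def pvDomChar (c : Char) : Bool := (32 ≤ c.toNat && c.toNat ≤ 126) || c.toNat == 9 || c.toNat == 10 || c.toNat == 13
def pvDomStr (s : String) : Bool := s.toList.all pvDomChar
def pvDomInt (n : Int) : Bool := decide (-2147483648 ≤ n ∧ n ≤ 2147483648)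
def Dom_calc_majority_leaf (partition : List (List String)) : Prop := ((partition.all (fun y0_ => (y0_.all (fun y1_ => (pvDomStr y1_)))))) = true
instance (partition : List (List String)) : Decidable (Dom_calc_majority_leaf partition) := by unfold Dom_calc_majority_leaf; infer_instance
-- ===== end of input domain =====

-- B replaces A's parallel values/counts arrays by dedup + max with a count key; equivalence of return values (neither mutates its argument).

-- ===== PORT A =====
-- counts[-1] += 1; on [] Python would raise IndexError, but A only reaches it with counts nonempty
def pvBumpLast : List Int → List Int
  | [] => []
  | [c] => [c + 1]
  | c :: t => c :: pvBumpLast t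

def get_frequencies (col : List String) : List String × List Int :=
  let colS := PySem.List.sorted col (fun x => x) false
  colS.foldl (fun vc v =>
    if v ∉ vc.1 then (vc.1 ++ [v], vc.2 ++ [(1 : Int)])
    else (vc.1, pvBumpLast vc.2)) ([], [])

def calc_majority_leaf (partition : List (List String)) : String :=
  let col := partition.map (fun item => (PySem.List.pyGet? item (-1)).getD "")
  let vc := get_frequencies col
  let max_num := (PySem.List.max? vc.2 (fun x => x)).getD 0
  let max_index := (PySem.List.index? vc.2 max_num).getD 0
  (PySem.List.pyGet? vc.1 (max_index : Int)).getD ""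

-- ===== PORT B =====
def calc_majority_leaf_alt (partition : List (List String)) : String :=
  let labels := PySem.List.sorted (partition.map (fun item => (PySem.List.pyGet? item (-1)).getD "")) (fun x => x) false
  (PySem.List.max? (PySem.List.dedup labels) (fun v => (labels.count v : Int))).getD ""

-- ===== PRECONDITION & SPEC =====
-- Pre_ excludes exactly the inputs where Python A raises: empty partition (max() of empty → ValueError)
-- and a partition containing an empty row (item[-1] → IndexError); B raises there too.
def Pre_calc_majority_leaf (partition : List (List String)) : Prop :=
  partition ≠ [] ∧ ∀ item ∈ partition, item ≠ []
instance (partition : List (List String)) : Decidable (Pre_calc_majority_leaf partition) := by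
  unfold Pre_calc_majority_leaf; infer_instance
def pvWitness_calc_majority_leaf : List (List String) :=
  [["a", "yes"], ["b", "no"], ["c", "yes"]]

def Spec_calc_majority_leaf (partition : List (List String)) (out : String) : Prop := out = calc_majority_leaf_alt partition
instance (partition : List (List String)) (out : String) : Decidable (Spec_calc_majority_leaf partition out) := by unfold Spec_calc_majority_leaf; infer_instance

-- ===== CLAIM (what is proved, stated in full; the proofs are below) =====
def Claim_equal_calc_majority_leaf : Prop := ∀ (partition : List (List String)), Dom_calc_majority_leaf partition → Pre_calc_majority_leaf partition → Spec_calc_majority_leaf partition (calc_majority_leaf partition)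

-- ===== LEMMAS AND PROOFS =====

theorem pvBumpLast_append (l : List Int) (c : Int) : pvBumpLast (l ++ [c]) = l ++ [c + 1] := by
  induction l with
  | nil => rfl
  | cons a t ih =>
    cases t with
    | nil => rfl
    | cons b t' => simpa [pvBumpLast] using ih

theorem pvDedup_sublist {α : Type} [BEq α] (xs : List α) : List.Sublist (PySem.List.dedup xs) xs := by
  induction xs using List.reverseRecOn with
  | nil => simp [PySem.List.dedup, PySem.Set.ofList]
  | append_singleton t x ih =>
    rw [PySem.List.dedup, PySem.Set.ofList_append_singleton, PySem.Set.add]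
    split
    · exact ih.trans (List.sublist_append_left t [x])
    · exact List.Sublist.append ih (List.Sublist.refl [x])

theorem pvDedup_pairwise_lt (xs : List String) (h : xs.Pairwise (· ≤ ·)) :
    (PySem.List.dedup xs).Pairwise (· < ·) := by
  have hle : (PySem.List.dedup xs).Pairwise (· ≤ ·) := h.sublist (pvDedup_sublist xs)
  have hnd : (PySem.List.dedup xs).Nodup := by
    rw [PySem.List.dedup_eq_ofList]; exact PySem.Set.nodup_ofList xs
  exact (hnd.and hle).imp (fun ⟨hne, hle'⟩ => lt_of_le_of_ne hle' hne)

theorem pvLast_decomp (l : List String) (v : String) (hlt : l.Pairwise (· < ·))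
    (hv : v ∈ l) (hub : ∀ x ∈ l, x ≤ v) : ∃ q, l = q ++ [v] ∧ v ∉ q := by
  have hne : l ≠ [] := by rintro rfl; simp at hv
  have hdec : l.dropLast ++ [l.getLast hne] = l := List.dropLast_append_getLast hne
  have hpw : ∀ x ∈ l.dropLast, x < l.getLast hne := by
    intro x hx
    have := hdec ▸ hlt
    rw [List.pairwise_append] at this
    exact this.2.2 x hx _ (by simp)
  have hvlast : v = l.getLast hne := by
    rcases (by rw [← hdec] at hv; simpa using hv : v ∈ l.dropLast ∨ v = l.getLast hne) with h | h
    · exact absurd (hub _ (List.getLast_mem hne)) (not_le.mpr (hpw v h))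
    · exact h
  exact ⟨l.dropLast, by rw [← hvlast] at hdec; exact hdec.symm, fun hq => absurd (hpw v hq) (by simp [hvlast])⟩

theorem pvGfLoop (ls : List String) : ∀ (p : List String), (p ++ ls).Pairwise (· ≤ ·) →
    ls.foldl (fun vc v => if v ∉ vc.1 then (vc.1 ++ [v], vc.2 ++ [(1 : Int)]) else (vc.1, pvBumpLast vc.2))
      (PySem.List.dedup p, (PySem.List.dedup p).map (fun v => (p.count v : Int)))
    = (PySem.List.dedup (p ++ ls), (PySem.List.dedup (p ++ ls)).map (fun v => ((p ++ ls).count v : Int))) := by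
  induction ls with
  | nil => intro p _; simp
  | cons v t ih =>
    intro p hs
    have hs' : ((p ++ [v]) ++ t).Pairwise (· ≤ ·) := by simpa using hs
    have hpv : p ++ v :: t = (p ++ [v]) ++ t := by simp
    have hple : p.Pairwise (· ≤ ·) := hs.sublist (List.sublist_append_left p (v :: t))
    have hub : ∀ x ∈ p, x ≤ v := by
      rw [List.pairwise_append] at hs
      exact fun x hx => hs.2.2 x hx v (by simp)
    have hstate : (if v ∉ PySem.List.dedup p
          then (PySem.List.dedup p ++ [v], (PySem.List.dedup p).map (fun y => (p.count y : Int)) ++ [(1 : Int)])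
          else (PySem.List.dedup p, pvBumpLast ((PySem.List.dedup p).map (fun y => (p.count y : Int)))))
        = (PySem.List.dedup (p ++ [v]), (PySem.List.dedup (p ++ [v])).map (fun y => (((p ++ [v]).count y : Nat) : Int))) := by
      by_cases hmem : v ∈ p
      · rw [if_neg (by simp [hmem])]
        have hded : PySem.List.dedup (p ++ [v]) = PySem.List.dedup p := by
          rw [PySem.List.dedup, PySem.Set.ofList_append_singleton, PySem.Set.add]
          simp [hmem, PySem.List.dedup]
        obtain ⟨q, hq, hvq⟩ := pvLast_decomp (PySem.List.dedup p) v (pvDedup_pairwise_lt p hple)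
          ((PySem.List.mem_dedup _ _).mpr hmem) (fun x hx => hub x ((PySem.List.mem_dedup _ _).mp hx))
        rw [hded, hq]
        refine Prod.ext rfl ?_
        simp only [List.map_append, List.map_cons, List.map_nil, pvBumpLast_append]
        congr 1
        · refine List.map_congr_left (fun x hx => ?_)
          have hxv : x ≠ v := fun h => hvq (h ▸ hx)
          simp [List.count_append, Ne.symm hxv]
        · simp [List.count_append]
      · rw [if_pos (by simp [hmem])]
        have hded : PySem.List.dedup (p ++ [v]) = PySem.List.dedup p ++ [v] := by
          rw [PySem.List.dedup, PySem.Set.ofList_append_singleton, PySem.Set.add]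
          simp [hmem, PySem.List.dedup]
        rw [hded]
        refine Prod.ext rfl ?_
        simp only [List.map_append, List.map_cons, List.map_nil]
        congr 1
        · refine List.map_congr_left (fun x hx => ?_)
          have hxv : x ≠ v := fun h => hmem (h ▸ (PySem.List.mem_dedup _ _).mp hx)
          simp [List.count_append, Ne.symm hxv]
        · simp [List.count_append, List.count_eq_zero.mpr hmem]
    rw [List.foldl_cons]
    calc _ = List.foldl _ (PySem.List.dedup (p ++ [v]), (PySem.List.dedup (p ++ [v])).map (fun y => (((p ++ [v]).count y : Nat) : Int))) t := by rw [← hstate]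
    _ = _ := by rw [hpv]; exact ih (p ++ [v]) hs'

def pvStepI : Option Int → Int → Option Int
  | none, x => some x
  | some m, x => if m < x then some x else some m

def pvStepF (f : String → Int) : Option String → String → Option String
  | none, x => some x
  | some m, x => if f m < f x then some x else some m

theorem pvMax?_eq_id (cs : List Int) :
    PySem.List.max? cs (fun x => x) = cs.foldl pvStepI none := by
  rw [PySem.List.max?]
  congr 1
  funext a x
  cases a <;> rfl

theorem pvMax?_eq_f (vs : List String) (f : String → Int) :
    PySem.List.max? vs f = vs.foldl (pvStepF f) none := by
  rw [PySem.List.max?]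
  congr 1
  funext a x
  cases a <;> rfl

theorem pvMaxMapAux (vs : List String) (f : String → Int) : ∀ (acc : Option String),
    (vs.map f).foldl pvStepI (acc.map f) = (vs.foldl (pvStepF f) acc).map f := by
  induction vs with
  | nil => intro acc; rfl
  | cons v t ih =>
    intro acc
    cases acc with
    | none => simpa [pvStepI, pvStepF] using ih (some v)
    | some m =>
      by_cases h : f m < f v
      · simpa [pvStepI, pvStepF, h] using ih (some v)
      · simpa [pvStepI, pvStepF, h] using ih (some m)

theorem pvMaxMap (vs : List String) (f : String → Int) :
    PySem.List.max? (vs.map f) (fun x => x) = (PySem.List.max? vs f).map f := by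
  rw [pvMax?_eq_id, pvMax?_eq_f]
  simpa using pvMaxMapAux vs f none

theorem pvFoldAcc (t : List String) (f : String → Int) : ∀ (w : String),
    ∃ u, t.foldl (pvStepF f) (some w) = some u ∧
      f w ≤ f u ∧ (∀ y ∈ t, f y ≤ f u) ∧
      (u = w ∨ ∃ K, ∃ (hK : K < t.length), t[K] = u ∧ f w < f u ∧
        ∀ j, ∀ (hj : j < t.length), j < K → f t[j] < f u) := by
  induction t with
  | nil => exact fun w => ⟨w, rfl, le_refl _, by simp, Or.inl rfl⟩
  | cons v t ih =>
    intro w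
    by_cases h : f w < f v
    · obtain ⟨u, hfold, hle, hall, hpos⟩ := ih v
      refine ⟨u, by simpa [pvStepF, h] using hfold, le_of_lt (lt_of_lt_of_le h hle), ?_, ?_⟩
      · intro y hy; rcases List.mem_cons.mp hy with rfl | hy
        · exact hle
        · exact hall y hy
      · rcases hpos with rfl | ⟨K, hK, hu, hwu, hfirst⟩
        · exact Or.inr ⟨0, by simp, by simp, h, by omega⟩
        · refine Or.inr ⟨K + 1, by simpa using Nat.succ_lt_succ hK, by simpa using hu,
            lt_trans h hwu, ?_⟩
          intro j hj hjK
          cases j with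
          | zero => simpa using hwu
          | succ j' => simpa using hfirst j' (by omega) (by omega)
    · obtain ⟨u, hfold, hle, hall, hpos⟩ := ih w
      refine ⟨u, by simpa [pvStepF, h] using hfold, hle, ?_, ?_⟩
      · intro y hy; rcases List.mem_cons.mp hy with rfl | hy
        · exact le_trans (le_of_not_gt h) hle
        · exact hall y hy
      · rcases hpos with rfl | ⟨K, hK, hu, hwu, hfirst⟩
        · exact Or.inl rfl
        · refine Or.inr ⟨K + 1, by simpa using Nat.succ_lt_succ hK, by simpa using hu, hwu, ?_⟩
          intro j hj hjK
          cases j with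
          | zero => simpa using lt_of_le_of_lt (le_of_not_gt h) hwu
          | succ j' => simpa using hfirst j' (by omega) (by omega)

theorem pvMaxFirst (vs : List String) (f : String → Int) (h : vs ≠ []) :
    ∃ u K, ∃ (hK : K < vs.length), PySem.List.max? vs f = some u ∧ vs[K] = u ∧
      (∀ j, ∀ (hj : j < vs.length), j < K → f vs[j] < f u) ∧ (∀ y ∈ vs, f y ≤ f u) := by
  cases vs with
  | nil => exact absurd rfl h
  | cons v t =>
    obtain ⟨u, hfold, hle, hall, hpos⟩ := pvFoldAcc t f v
    have hmax : PySem.List.max? (v :: t) f = some u := by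
      rw [pvMax?_eq_f, List.foldl_cons]
      simpa [pvStepF] using hfold
    rcases hpos with rfl | ⟨K, hK, hu, hwu, hfirst⟩
    · exact ⟨u, 0, by simp, hmax, rfl, by omega, by
        intro y hy; rcases List.mem_cons.mp hy with rfl | hy
        · exact le_refl _
        · exact hall y hy⟩
    · refine ⟨u, K + 1, by simpa using Nat.succ_lt_succ hK, hmax, by simpa using hu, ?_, ?_⟩
      · intro j hj hjK
        cases j with
        | zero => simpa using hwu
        | succ j' => simpa using hfirst j' (by omega) (by omega)
      · intro y hy; rcases List.mem_cons.mp hy with rfl | hy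
        · exact le_of_lt hwu
        · exact hall y hy

theorem pvGfLoop' (ls : List String) (h : ls.Pairwise (· ≤ ·)) :
    ls.foldl (fun vc v => if v ∉ vc.1 then (vc.1 ++ [v], vc.2 ++ [(1 : Int)]) else (vc.1, pvBumpLast vc.2)) ([], [])
    = (PySem.List.dedup ls, (PySem.List.dedup ls).map (fun v => (ls.count v : Int))) := by
  simpa using pvGfLoop ls [] (by simpa using h)

theorem pvFinal (partition : List (List String)) (hne : partition ≠ []) :
    calc_majority_leaf partition = calc_majority_leaf_alt partition := by
  simp only [calc_majority_leaf, calc_majority_leaf_alt, get_frequencies]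
  set col := partition.map (fun item => (PySem.List.pyGet? item (-1)).getD "") with hcol
  set ls := PySem.List.sorted col (fun x => x) false with hls
  have hsorted : ls.Pairwise (· ≤ ·) := by
    simpa using PySem.List.sorted_pairwise col (fun x => x)
  have hlsne : ls ≠ [] := by
    rw [hls, Ne, PySem.List.sorted_eq_nil_iff]
    simpa [hcol] using hne
  rw [pvGfLoop' ls hsorted]
  set f : String → Int := fun v => (ls.count v : Int) with hf
  set vs := PySem.List.dedup ls with hvs
  have hvsne : vs ≠ [] := by
    cases hl : ls with
    | nil => exact absurd hl hlsne
    | cons a t =>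
      have : a ∈ vs := (PySem.List.mem_dedup _ _).mpr (by simp [hl])
      exact List.ne_nil_of_mem this
  obtain ⟨u, K, hK, hmax, hKu, hfirst, hub⟩ := pvMaxFirst vs f hvsne
  have hmaxmap : PySem.List.max? (vs.map f) (fun x => x) = some (f u) := by
    rw [pvMaxMap, hmax]; rfl
  simp only [hmaxmap, Option.getD_some, hmax]
  -- index of the max in the counts list
  have hmemmap : f u ∈ vs.map f := List.mem_map.mpr ⟨u, hKu ▸ List.getElem_mem hK, rfl⟩
  obtain ⟨i, hi⟩ := Option.isSome_iff_exists.mp ((PySem.List.index?_isSome_iff _ _).mpr hmemmap)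
  obtain ⟨hilen, hival, hifirst⟩ := PySem.List.getElem_of_index?_eq_some hi
  have hiK : i = K := by
    rcases lt_trichotomy i K with hlt | heq | hgt
    · have h1 : f vs[i] < f u := hfirst i (by simpa using hilen) hlt
      have h2 : f vs[i] = f u := by simpa using hival
      omega
    · exact heq
    · have h1 : (vs.map f)[K]'(by simpa using hK) ≠ f u := hifirst K hgt
      exact absurd (by simpa using congrArg f hKu) h1
  rw [hi, Option.getD_some, hiK]
  rw [PySem.List.pyGet?_natCast]
  simp [List.getElem?_eq_getElem hK, hKu]

-- ===== VERDICT (by name: the statement is the Claim_ definition above) =====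
theorem calc_majority_leaf_spec : Claim_equal_calc_majority_leaf := by
  intro partition _ hpre
  exact pvFinal partition hpre.1
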